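-- pv_equiv track=rewrite | github.com/nickbuker/python_practice | src/number_climber.py | rec_climb
-- ===== SOURCE A (Python) =====
-- def rec_climb(n, nums=[1]):
--     if nums[-1] < n:
--         result1 = rec_climb(n, nums + [nums[-1] * 2])
--         result2 = rec_climb(n, nums + [(nums[-1] * 2) + 1])
--         if result1 is None:
--             return result2
--         else:
--             return result1
--
--     if nums[-1] == n:
--         return nums
-- ===== SOURCE B (Python) =====
-- def rec_climb(n, nums=[1]):
--     # The doubling path from nums[-1] to n, if any, is unique -- its values
--     # are exactly the right-shifts of n -- so walk n down by halving instead
--     # of searching the two-branch tree.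
--     last = nums[-1]
--     shifted = n
--     suffix = []
--     while shifted > last and shifted > 0:
--         suffix.append(shifted)
--         shifted >>= 1
--     if shifted == last:
--         return nums + suffix[::-1]
--     return None
-- ===== Notes on version B (the rewrite author's own statement) =====
-- stated objective: alternative
-- what changed: Replaces the two-branch recursive search over doubling paths with a single halving loop: the doubling path's values are exactly the right-shifts of n, so B walks n down to nums[-1] and never branches.
import Mathlib
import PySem

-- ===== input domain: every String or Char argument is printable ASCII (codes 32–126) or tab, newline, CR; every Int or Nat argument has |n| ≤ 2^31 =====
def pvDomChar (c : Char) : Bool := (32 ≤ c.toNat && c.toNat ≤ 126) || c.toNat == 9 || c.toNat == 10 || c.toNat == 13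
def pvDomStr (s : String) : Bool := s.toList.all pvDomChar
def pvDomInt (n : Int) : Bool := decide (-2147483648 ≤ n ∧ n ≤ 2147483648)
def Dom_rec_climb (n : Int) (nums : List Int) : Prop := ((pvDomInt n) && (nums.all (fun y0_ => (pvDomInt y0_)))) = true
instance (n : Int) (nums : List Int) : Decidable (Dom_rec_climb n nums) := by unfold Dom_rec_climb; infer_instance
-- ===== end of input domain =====

-- B replaces A's two-branch recursive search by a single halving loop over n; return values only, no mutation.

-- ===== PORT A =====
-- A's recursion is not structurally terminating in Lean (and the Python really
-- diverges when nums[-1] ≤ 0 < n − nums[-1]… — excluded by Pre_), so the port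
-- carries a fuel counter; fuel (n - nums[-1]).toNat + 1 suffices on Pre_
-- because each recursive step strictly increases nums[-1] when 1 ≤ nums[-1].
def climbA (fuel : Nat) (n : Int) (nums : List Int) : Option (List Int) :=
  match fuel with
  | 0 => none
  | fuel + 1 =>
    match PySem.List.pyGet? nums (-1) with
    | none => none            -- IndexError on empty nums (outside Pre_)
    | some last =>
      if last < n then
        let result1 := climbA fuel n (nums ++ [last * 2])
        let result2 := climbA fuel n (nums ++ [last * 2 + 1])
        match result1 with
        | none => result2
        | some r => some r
      else if last = n then some nums else none

def rec_climb (n : Int) (nums : List Int) : Option (List Int) :=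
  climbA ((n - (nums.getLast?.getD 0)).toNat + 1) n nums

-- ===== PORT B =====
-- the while loop of Source B: halve `shifted` while it is above last (and positive),
-- recording the visited values
def climbB (shifted last : Int) (suffix : List Int) : Int × List Int :=
  if h : shifted > last ∧ shifted > 0 then
    climbB (PySem.Int.floordiv shifted 2) last (suffix ++ [shifted])
  else (shifted, suffix)
termination_by shifted.toNat
decreasing_by
  rw [PySem.Int.floordiv_eq_ediv_of_pos (by norm_num : (0:Int) < 2)]
  omega

def rec_climb_alt (n : Int) (nums : List Int) : Option (List Int) :=
  match PySem.List.pyGet? nums (-1) with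
  | none => none              -- IndexError on empty nums (outside Pre_)
  | some last =>
    let r := climbB n last []
    if r.1 = last then some (nums ++ r.2.reverse) else none

-- ===== PRECONDITION & SPEC =====
-- Pre_ excludes exactly the inputs where Python A raises: empty nums
-- (IndexError) and nums[-1] ≤ 0 with nums[-1] < n (unbounded recursion,
-- RecursionError).
def Pre_rec_climb (n : Int) (nums : List Int) : Prop :=
  nums ≠ [] ∧ (n ≤ nums.getLast?.getD 0 ∨ 1 ≤ nums.getLast?.getD 0)
instance (n : Int) (nums : List Int) : Decidable (Pre_rec_climb n nums) := by
  unfold Pre_rec_climb; infer_instance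

def pvWitness_rec_climb : Int × List Int := (37, [1])

def Spec_rec_climb (n : Int) (nums : List Int) (out : Option (List Int)) : Prop := out = rec_climb_alt n nums
instance (n : Int) (nums : List Int) (out : Option (List Int)) : Decidable (Spec_rec_climb n nums out) := by unfold Spec_rec_climb; infer_instance

-- ===== CLAIM (what is proved, stated in full; the proofs are below) =====
def Claim_equal_rec_climb : Prop := ∀ (n : Int) (nums : List Int), Dom_rec_climb n nums → Pre_rec_climb n nums → Spec_rec_climb n nums (rec_climb n nums)

-- ===== LEMMAS AND PROOFS =====

-- A's recursion with nums abstracted away: the suffix of values appended after nums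
def gA (fuel : Nat) (n last : Int) : Option (List Int) :=
  match fuel with
  | 0 => none
  | fuel + 1 =>
    if last < n then
      match (gA fuel n (last * 2)).map (fun l => (last * 2) :: l) with
      | none => (gA fuel n (last * 2 + 1)).map (fun l => (last * 2 + 1) :: l)
      | some r => some r
    else if last = n then some [] else none

-- B's result with nums abstracted away
def gB (s last : Int) : Option (List Int) :=
  if (climbB s last []).1 = last then some (climbB s last []).2.reverse else none

theorem climbB_eq (s last : Int) (suffix : List Int) :
    climbB s last suffix =
      if s > last ∧ s > 0 then
        climbB (PySem.Int.floordiv s 2) last (suffix ++ [s])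
      else (s, suffix) := by
  rw [climbB.eq_def]
  split <;> rfl

theorem climbB_factor (s last : Int) (suffix : List Int) :
    climbB s last suffix = ((climbB s last []).1, suffix ++ (climbB s last []).2) := by
  by_cases h : s > last ∧ s > 0
  · rw [climbB_eq s last suffix, climbB_eq s last [], if_pos h, if_pos h]
    simp only [List.nil_append]
    rw [climbB_factor (PySem.Int.floordiv s 2) last (suffix ++ [s]),
        climbB_factor (PySem.Int.floordiv s 2) last [s]]
    simp
  · rw [climbB_eq s last suffix, climbB_eq s last [], if_neg h, if_neg h]
    simp
termination_by s.toNat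
decreasing_by
  all_goals
    rw [PySem.Int.floordiv_eq_ediv_of_pos (by norm_num : (0:Int) < 2)]
    omega

theorem factorA (fuel : Nat) (n : Int) : ∀ (nums : List Int) (last : Int),
    nums.getLast? = some last →
    climbA fuel n nums = (gA fuel n last).map (fun l => nums ++ l) := by
  induction fuel with
  | zero => intro nums last _; simp [climbA, gA]
  | succ fuel ih =>
    intro nums last h
    simp only [climbA, gA, PySem.List.pyGet?_neg_one, h]
    by_cases hlt : last < n
    · rw [if_pos hlt, if_pos hlt,
          ih (nums ++ [last * 2]) (last * 2) (by simp),
          ih (nums ++ [last * 2 + 1]) (last * 2 + 1) (by simp)]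
      cases gA fuel n (last * 2) <;> cases gA fuel n (last * 2 + 1) <;> simp
    · rw [if_neg hlt, if_neg hlt]
      by_cases he : last = n
      · rw [if_pos he, if_pos he]; simp
      · rw [if_neg he, if_neg he]; simp

theorem floordiv_two (s : Int) (hs : 0 < s) :
    PySem.Int.floordiv s 2 = s / 2 :=
  PySem.Int.floordiv_eq_ediv_of_pos (by norm_num)

-- one loop step, factored
theorem gB_step_once (s last : Int) (h : s > last ∧ s > 0) :
    gB s last = (gB (PySem.Int.floordiv s 2) last).map (fun l => l ++ [s]) := by
  unfold gB
  rw [climbB_eq s last [], if_pos h]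
  simp only [List.nil_append]
  rw [climbB_factor (PySem.Int.floordiv s 2) last [s]]
  by_cases hc : (climbB (PySem.Int.floordiv s 2) last []).1 = last <;> simp [hc]

-- loop already stopped
theorem gB_stop (s last : Int) (h : ¬ (s > last ∧ s > 0)) :
    gB s last = if s = last then some [] else none := by
  unfold gB
  rw [climbB_eq s last [], if_neg h]
  simp

-- the key recurrence of B's closed computation, matching A's branching
theorem gB_step (last : Int) (hlast : 1 ≤ last) : ∀ (s : Int), last < s →
    gB s last =
      (match (gB s (last * 2)).map (fun l => (last * 2) :: l) with
       | none => (gB s (last * 2 + 1)).map (fun l => (last * 2 + 1) :: l)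
       | some r => some r) := by
  intro s
  induction hk : s.toNat using Nat.strong_induction_on generalizing s with
  | _ k ih =>
  intro hls
  have hs0 : 0 < s := by omega
  have hd2 : PySem.Int.floordiv s 2 = s / 2 := floordiv_two s hs0
  by_cases hbig : s > last * 2 + 1
  · -- all three loops take the same first step to s / 2
    rw [gB_step_once s last ⟨hls, hs0⟩, gB_step_once s (last * 2) ⟨by omega, hs0⟩,
        gB_step_once s (last * 2 + 1) ⟨hbig, hs0⟩, hd2]
    rw [ih (s / 2).toNat (by omega) (s / 2) rfl (by omega)]
    cases gB (s / 2) (last * 2) <;> cases gB (s / 2) (last * 2 + 1) <;> simp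
  · by_cases h2l : s = last * 2
    · -- LHS stops after one step at last; RHS: first branch stops at once and matches
      rw [gB_step_once s last ⟨hls, hs0⟩, hd2,
          gB_stop (s / 2) last (by omega), if_pos (show s / 2 = last by omega),
          gB_stop s (last * 2) (by omega), if_pos h2l,
          gB_stop s (last * 2 + 1) (by omega), if_neg (show ¬ s = last * 2 + 1 by omega)]
      simp [h2l]
    · by_cases h2l1 : s = last * 2 + 1
      · -- LHS stops after one step at last; RHS: first branch fails, second matches
        rw [gB_step_once s last ⟨hls, hs0⟩, hd2,
            gB_stop (s / 2) last (by omega), if_pos (show s / 2 = last by omega),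
            gB_step_once s (last * 2) ⟨by omega, hs0⟩, hd2,
            gB_stop (s / 2) (last * 2) (by omega), if_neg (show ¬ s / 2 = last * 2 by omega),
            gB_stop s (last * 2 + 1) (by omega), if_pos h2l1]
        simp [h2l1]
      · -- last < s < 2·last: one halving lands strictly below last; everything is none
        rw [gB_step_once s last ⟨hls, hs0⟩, hd2,
            gB_stop (s / 2) last (by omega), if_neg (show ¬ s / 2 = last by omega),
            gB_stop s (last * 2) (by omega), if_neg h2l,
            gB_stop s (last * 2 + 1) (by omega), if_neg h2l1]
        simp

theorem gA_base (fuel : Nat) (n last : Int) (h : ¬ last < n) :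
    gA (fuel + 1) n last = gB n last := by
  rw [gB_stop n last (by omega)]
  simp only [gA]
  rw [if_neg h]
  by_cases he : last = n
  · rw [if_pos he, if_pos (show n = last from he.symm)]
  · rw [if_neg he, if_neg (show ¬ n = last from fun hh => he hh.symm)]

theorem main_eq (fuel : Nat) : ∀ (n last : Int), 1 ≤ last → (n - last).toNat < fuel →
    gA fuel n last = gB n last := by
  induction fuel with
  | zero => intro n last _ hf; omega
  | succ fuel ih =>
    intro n last h1 hf
    by_cases hlt : last < n
    · simp only [gA]
      rw [if_pos hlt, ih n (last * 2) (by omega) (by omega),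
          ih n (last * 2 + 1) (by omega) (by omega)]
      exact (gB_step last h1 n hlt).symm
    · exact gA_base fuel n last hlt

theorem alt_factored (n : Int) (nums : List Int) (last : Int) (h : nums.getLast? = some last) :
    rec_climb_alt n nums = (gB n last).map (fun l => nums ++ l) := by
  simp only [rec_climb_alt, PySem.List.pyGet?_neg_one, h, gB]
  by_cases hc : (climbB n last []).1 = last <;> simp [hc]

-- ===== VERDICT (by name: the statement is the Claim_ definition above) =====
theorem rec_climb_spec : Claim_equal_rec_climb := by
  intro n nums _ hpre
  obtain ⟨hne, hdisj⟩ := hpre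
  obtain ⟨last, hlast⟩ : ∃ last, nums.getLast? = some last := by
    cases h : nums.getLast? with
    | none => exact absurd (List.getLast?_eq_none_iff.mp h) hne
    | some l => exact ⟨l, rfl⟩
  have hD : nums.getLast?.getD 0 = last := by rw [hlast]; rfl
  rw [hD] at hdisj
  show rec_climb n nums = rec_climb_alt n nums
  rw [alt_factored n nums last hlast]
  unfold rec_climb
  rw [hlast]
  show climbA ((n - last).toNat + 1) n nums = _
  rw [factorA ((n - last).toNat + 1) n nums last hlast]
  rcases hdisj with hle | h1
  · rw [gA_base ((n - last).toNat) n last (by omega)]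
  · rw [main_eq ((n - last).toNat + 1) n last h1 (by omega)]
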